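-- pv_equiv track=rewrite | github.com/shreyas20063/SCOPE | backend/core/tf_parser.py | _find_top_level_slash
-- ===== SOURCE A (Python) =====
-- def _find_top_level_slash(expr: str) -> int:
--     """Find index of '/' not inside parentheses. Returns -1 if not found."""
--     depth = 0
--     for i, ch in enumerate(expr):
--         if ch == '(':
--             depth += 1
--         elif ch == ')':
--             depth -= 1
--         elif ch == '/' and depth == 0:
--             return i
--     return -1
-- ===== SOURCE B (Python) =====
-- def _find_top_level_slash(expr: str) -> int:
--     """Find index of '/' not inside parentheses. Returns -1 if not found."""
--     depths = [0]
--     for ch in expr: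
--         depths.append(depths[-1] + (ch == '(') - (ch == ')'))
--     return next((i for i, (ch, d) in enumerate(zip(expr, depths))
--                  if ch == '/' and d == 0), -1)
-- ===== Notes on version B (the rewrite author's own statement) =====
-- stated objective: alternative
-- what changed: Replaced the fused single scan that tracks depth and tests '/' in one loop by two passes: first a prefix-sum pass building the parenthesis-depth-before-each-position table, then a separate search over (char, depth) pairs returning the first top-level '/'.
import Mathlib
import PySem

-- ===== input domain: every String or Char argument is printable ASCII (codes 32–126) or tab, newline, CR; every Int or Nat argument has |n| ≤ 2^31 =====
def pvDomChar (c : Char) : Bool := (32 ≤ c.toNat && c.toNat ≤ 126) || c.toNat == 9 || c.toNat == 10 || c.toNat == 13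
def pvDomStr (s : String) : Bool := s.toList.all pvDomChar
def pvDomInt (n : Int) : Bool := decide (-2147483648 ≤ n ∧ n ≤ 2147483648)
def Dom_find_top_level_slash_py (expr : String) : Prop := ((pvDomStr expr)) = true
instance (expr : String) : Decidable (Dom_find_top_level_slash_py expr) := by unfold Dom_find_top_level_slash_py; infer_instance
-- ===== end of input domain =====

-- B replaces A's fused depth-tracking scan by a prefix-sum depth table plus a separate search pass (alternative decomposition, same cost).

-- ===== PORT A =====
-- A's single loop: depth accumulator, early return at a top-level '/'.
def findSlashGoA : List Char → Int → Int → Int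
  | [], _, _ => -1
  | c :: cs, i, depth =>
    if c = '(' then findSlashGoA cs (i + 1) (depth + 1)
    else if c = ')' then findSlashGoA cs (i + 1) (depth - 1)
    else if c = '/' ∧ depth = 0 then i
    else findSlashGoA cs (i + 1) depth

def find_top_level_slash_py (expr : String) : Int :=
  findSlashGoA expr.toList 0 0

-- ===== PORT B =====
-- Source B pass 1: the depth-before-each-position table [0, …] (prefix sums of ±1).
def depthTable : List Char → Int → List Int
  | [], d => [d]
  | c :: cs, d =>
    d :: depthTable cs (d + (if c = '(' then 1 else 0) - (if c = ')' then 1 else 0))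

-- Source B pass 2: first index where the char is '/' and its pre-depth is 0.
def searchSlash : List Char → List Int → Int → Int
  | c :: cs, d :: ds, i => if c = '/' ∧ d = 0 then i else searchSlash cs ds (i + 1)
  | _, _, _ => -1

def find_top_level_slash_py_alt (expr : String) : Int :=
  searchSlash expr.toList (depthTable expr.toList 0) 0

-- ===== PRECONDITION & SPEC =====
def Spec_find_top_level_slash_py (expr : String) (out : Int) : Prop := out = find_top_level_slash_py_alt expr
instance (expr : String) (out : Int) : Decidable (Spec_find_top_level_slash_py expr out) := by unfold Spec_find_top_level_slash_py; infer_instance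

-- ===== CLAIM (what is proved, stated in full; the proofs are below) =====
def Claim_equal_find_top_level_slash_py : Prop := ∀ (expr : String), Dom_find_top_level_slash_py expr → Spec_find_top_level_slash_py expr (find_top_level_slash_py expr)

-- ===== LEMMAS AND PROOFS =====
theorem goA_eq_search (cs : List Char) : ∀ (d i : Int),
    findSlashGoA cs i d = searchSlash cs (depthTable cs d) i := by
  induction cs with
  | nil => intro d i; rfl
  | cons c cs ih =>
    intro d i
    by_cases hp : c = '('
    · have hs : ¬ (c = '/' ∧ d = 0) := by simp [hp]
      simp [findSlashGoA, depthTable, searchSlash, hp, hs, ih]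
    · by_cases hq : c = ')'
      · have hs : ¬ (c = '/' ∧ d = 0) := by simp [hq]
        simp [findSlashGoA, depthTable, searchSlash, hp, hq, hs, ih]
      · by_cases hs : c = '/' ∧ d = 0
        · simp [findSlashGoA, depthTable, searchSlash, hp, hq, hs]
        · simp [findSlashGoA, depthTable, searchSlash, hp, hq, hs, ih]

-- ===== VERDICT (by name: the statement is the Claim_ definition above) =====
theorem find_top_level_slash_py_spec : Claim_equal_find_top_level_slash_py := by
  intro expr _
  unfold Spec_find_top_level_slash_py find_top_level_slash_py find_top_level_slash_py_alt
  exact goA_eq_search expr.toList 0 0
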